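-- pv_equiv track=rewrite | github.com/rumenji/pythonDataStructures | fs_3_three_odd_numbers/three_odd_numbers.py | three_odd_numbers
-- ===== SOURCE A (Python) =====
-- def three_odd_numbers(nums):
--     """Is the sum of any 3 sequential numbers odd?"
--
--         >>> three_odd_numbers([1, 2, 3, 4, 5])
--         True
--
--         >>> three_odd_numbers([0, -2, 4, 1, 9, 12, 4, 1, 0])
--         True
--
--         >>> three_odd_numbers([5, 2, 1])
--         False
--
--         >>> three_odd_numbers([1, 2, 3, 3, 2])
--         False
--     """
--     index = 1
--     for num in nums:
--         if index + 2 <= len(nums):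
--             sum = num + nums[index] + nums[index + 1]
--             if sum % 2 != 0:
--                 return True
--             index += 1
--     return False
-- ===== SOURCE B (Python) =====
-- def three_odd_numbers(nums):
--     prefix = [0]
--     for x in nums:
--         prefix.append(prefix[-1] + x)
--     return any((prefix[i + 3] - prefix[i]) % 2 != 0 for i in range(len(nums) - 2))
-- ===== Notes on version B (the rewrite author's own statement) =====
-- stated objective: alternative
-- what changed: Replaces A's per-element loop that re-sums each window of three via direct indexing with a prefix-sum table built in one pass followed by an any() over window-sum differences P[i+3]-P[i].
import Mathlib
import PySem

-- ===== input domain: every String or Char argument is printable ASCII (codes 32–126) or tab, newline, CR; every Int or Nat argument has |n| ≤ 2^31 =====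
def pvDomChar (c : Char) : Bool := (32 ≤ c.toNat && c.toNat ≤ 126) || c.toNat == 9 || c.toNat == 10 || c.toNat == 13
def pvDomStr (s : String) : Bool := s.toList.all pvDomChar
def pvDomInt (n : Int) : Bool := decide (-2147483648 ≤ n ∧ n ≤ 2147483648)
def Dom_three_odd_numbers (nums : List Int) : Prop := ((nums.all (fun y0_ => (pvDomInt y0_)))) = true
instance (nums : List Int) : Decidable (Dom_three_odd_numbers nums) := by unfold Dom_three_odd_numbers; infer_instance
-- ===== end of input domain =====

-- B replaces A's per-window re-summation by a prefix-sum table plus a single comparison pass (alternative decomposition, same cost).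


-- ===== PORT A =====
-- A's loop: `index` starts at 1; per element, if index+2 ≤ len, sum the window
-- num + nums[index] + nums[index+1] and return True if it is odd, else advance.
-- nums[index], nums[index+1] are always in range when read (1 ≤ index ≤ len-2),
-- so pyGetD with default 0 is exact here.
def aLoop (nums : List Int) (rest : List Int) (index : Int) : Bool :=
  match rest with
  | [] => false
  | num :: t =>
    if index + 2 ≤ (nums.length : Int) then
      if PySem.Int.mod (num + PySem.List.pyGetD nums index 0 + PySem.List.pyGetD nums (index + 1) 0) 2 ≠ 0
      then true
      else aLoop nums t (index + 1)
    else aLoop nums t index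

def three_odd_numbers (nums : List Int) : Bool := aLoop nums nums 1

-- ===== PORT B =====
-- prefix[-1]: the list is always nonempty, so pyGetD with default 0 is exact.
def three_odd_numbers_alt (nums : List Int) : Bool :=
  let pfx := nums.foldl (fun P x => P ++ [PySem.List.pyGetD P (-1) 0 + x]) [0]
  (PySem.List.pyRange 0 ((nums.length : Int) - 2) 1).any
    (fun i => PySem.Int.mod (PySem.List.pyGetD pfx (i + 3) 0 - PySem.List.pyGetD pfx i 0) 2 != 0)

-- ===== PRECONDITION & SPEC =====
def Spec_three_odd_numbers (nums : List Int) (out : Bool) : Prop := out = three_odd_numbers_alt nums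
instance (nums : List Int) (out : Bool) : Decidable (Spec_three_odd_numbers nums out) := by unfold Spec_three_odd_numbers; infer_instance

-- ===== CLAIM (what is proved, stated in full; the proofs are below) =====
def Claim_equal_three_odd_numbers : Prop := ∀ (nums : List Int), Dom_three_odd_numbers nums → Spec_three_odd_numbers nums (three_odd_numbers nums)

-- ===== LEMMAS AND PROOFS =====

-- common reference: does any window of 3 consecutive elements have odd sum?
def tripleOdd : List Int → Bool
  | a :: b :: c :: t => (PySem.Int.mod (a + b + c) 2 != 0) || tripleOdd (b :: c :: t)
  | _ => false

-- running suffix of prefix sums starting from accumulated value s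
def psums (s : Int) : List Int → List Int
  | [] => []
  | x :: t => (s + x) :: psums (s + x) t

theorem aLoop_dead (nums rest : List Int) (index : Int)
    (h : ¬ index + 2 ≤ (nums.length : Int)) : aLoop nums rest index = false := by
  induction rest with
  | nil => rfl
  | cons x t ih => simp [aLoop, h, ih]

theorem tripleOdd_short (xs : List Int) (h : xs.length < 3) : tripleOdd xs = false := by
  match xs with
  | [] => rfl
  | [a] => rfl
  | [a, b] => rfl
  | a :: b :: c :: t => simp at h; omega

theorem aLoop_drop (nums : List Int) (k : Nat) :
    aLoop nums (nums.drop k) ((k : Int) + 1) = tripleOdd (nums.drop k) := by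
  by_cases h3 : k + 3 ≤ nums.length
  · have hk : k < nums.length := by omega
    have hk1 : k + 1 < nums.length := by omega
    have hk2 : k + 2 < nums.length := by omega
    have hrec := aLoop_drop nums (k + 1)
    conv_lhs => rw [List.drop_eq_getElem_cons hk]
    conv_rhs => rw [List.drop_eq_getElem_cons hk, List.drop_eq_getElem_cons hk1,
      List.drop_eq_getElem_cons hk2]
    simp only [aLoop, tripleOdd]
    rw [if_pos (show (k : Int) + 1 + 2 ≤ (nums.length : Int) by omega)]
    rw [show (k : Int) + 1 = ((k + 1 : Nat) : Int) by push_cast; ring,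
      show ((k + 1 : Nat) : Int) + 1 = ((k + 2 : Nat) : Int) by push_cast; ring,
      PySem.List.pyGetD_natCast, PySem.List.pyGetD_natCast,
      List.getD_eq_getElem?_getD, List.getD_eq_getElem?_getD]
    simp only [List.getElem?_eq_getElem hk1, List.getElem?_eq_getElem hk2, Option.getD_some]
    by_cases hodd : PySem.Int.mod (nums[k] + nums[k + 1] + nums[k + 2]) 2 = 0
    · simp only [hodd, ne_eq, not_true_eq_false, if_false, bne_self_eq_false, Bool.false_or]
      rw [← List.drop_eq_getElem_cons hk2, ← List.drop_eq_getElem_cons hk1]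
      rw [show ((k + 2 : Nat) : Int) = ((k + 1 : Nat) : Int) + 1 by push_cast; ring]
      exact hrec
    · rw [PySem.Int.mod_eq_emod_of_pos (by norm_num : (0 : Int) < 2)] at hodd
      have h1 : (nums[k] + nums[k + 1] + nums[k + 2]) % 2 = 1 := by omega
      simp [h1]
  · have hdead : ¬ ((k : Int) + 1) + 2 ≤ (nums.length : Int) := by omega
    rw [aLoop_dead nums _ _ hdead, tripleOdd_short]
    simp; omega
termination_by nums.length - k

theorem any_congr_mem {α : Type} (l : List α) (p q : α → Bool)
    (h : ∀ a ∈ l, p a = q a) : l.any p = l.any q := by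
  induction l with
  | nil => rfl
  | cons x t ih => simp_all [List.any_cons]

theorem pyGetD_neg_one (acc : List Int) (s : Int) (h : acc.getLast? = some s) :
    PySem.List.pyGetD acc (-1) 0 = s := by
  cases acc with
  | nil => simp at h
  | cons a t =>
    rw [List.getLast?_eq_getElem?] at h
    simp only [PySem.List.pyGetD, PySem.List.pyGet?, PySem.List.pyIdx?]
    have hc : -(((a :: t).length : Int)) ≤ -1 := by
      simp only [List.length_cons]; push_cast; omega
    rw [if_pos hc, if_neg (show ¬ (0 : Int) ≤ -1 by norm_num)]
    simp only [List.length_cons, Nat.add_sub_cancel, List.getElem?_eq_getElem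
      (show t.length < (a :: t).length by simp)] at h
    simpa using h

theorem foldl_psums (xs : List Int) (acc : List Int) (s : Int)
    (h : acc.getLast? = some s) :
    xs.foldl (fun P x => P ++ [PySem.List.pyGetD P (-1) 0 + x]) acc = acc ++ psums s xs := by
  induction xs generalizing acc s with
  | nil => simp [psums]
  | cons x t ih =>
    simp only [List.foldl_cons, psums]
    rw [pyGetD_neg_one acc s h]
    rw [ih (acc ++ [s + x]) (s + x) (by simp)]
    simp

theorem psums_getD (xs : List Int) (s : Int) (j : Nat) (h : j < xs.length) :
    (psums s xs).getD j 0 = s + ((xs.take (j + 1)).sum) := by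
  induction xs generalizing s j with
  | nil => simp at h
  | cons x t ih =>
    cases j with
    | zero => simp [psums]
    | succ j =>
      simp only [psums, List.getD_cons_succ, List.take_succ_cons, List.sum_cons]
      rw [ih (s + x) j (by simpa using h)]
      ring

theorem pfx_getD (nums : List Int) (j : Nat) (h : j ≤ nums.length) :
    (0 :: psums 0 nums).getD j 0 = (nums.take j).sum := by
  cases j with
  | zero => simp
  | succ j =>
    simp only [List.getD_cons_succ]
    rw [psums_getD nums 0 j (by omega)]
    ring

theorem range_any_tripleOdd (nums : List Int) :
    (List.range (nums.length - 2)).any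
      (fun j => PySem.Int.mod (((nums.take (j + 3)).sum - (nums.take j).sum)) 2 != 0)
      = tripleOdd nums := by
  match nums with
  | [] => rfl
  | [a] => rfl
  | [a, b] => rfl
  | a :: b :: c :: t =>
    have hlen : (a :: b :: c :: t).length - 2 = t.length + 1 := by simp
    rw [hlen, List.range_succ_eq_map, List.any_cons, List.any_map]
    have h0 : PySem.Int.mod (((a :: b :: c :: t).take 3).sum - ((a :: b :: c :: t).take 0).sum) 2
        = PySem.Int.mod (a + b + c) 2 := by
      simp only [List.take, List.sum_cons, List.sum_nil]
      congr 1
      ring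
    have hfun : ((fun j => PySem.Int.mod (((a :: b :: c :: t).take (j + 3)).sum
          - ((a :: b :: c :: t).take j).sum) 2 != 0) ∘ Nat.succ)
        = (fun j => PySem.Int.mod (((b :: c :: t).take (j + 3)).sum
          - ((b :: c :: t).take j).sum) 2 != 0) := by
      funext j
      have e1 : (a :: b :: c :: t).take (j + 1 + 3) = a :: (b :: c :: t).take (j + 3) := by
        rw [show j + 1 + 3 = (j + 3) + 1 by ring]
        exact List.take_succ_cons
      have e2 : (a :: b :: c :: t).take (j + 1) = a :: (b :: c :: t).take j :=
        List.take_succ_cons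
      simp only [Function.comp, Nat.succ_eq_add_one, e1, e2, List.sum_cons]
      rw [show a + ((b :: c :: t).take (j + 3)).sum - (a + ((b :: c :: t).take j).sum)
        = ((b :: c :: t).take (j + 3)).sum - ((b :: c :: t).take j).sum by ring]
    rw [h0, hfun]
    have ht : t.length = (b :: c :: t).length - 2 := by simp
    rw [ht, range_any_tripleOdd (b :: c :: t)]
    rfl

theorem alt_eq_tripleOdd (nums : List Int) : three_odd_numbers_alt nums = tripleOdd nums := by
  unfold three_odd_numbers_alt
  rw [foldl_psums nums [0] 0 rfl]
  by_cases h2 : 3 ≤ nums.length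
  · rw [show ((nums.length : Int) - 2) = ((nums.length - 2 : Nat) : Int) by omega]
    rw [PySem.List.pyRange_zero_nat, List.any_map]
    rw [← range_any_tripleOdd nums]
    apply any_congr_mem
    intro j hj
    rw [List.mem_range] at hj
    simp only [Function.comp]
    rw [show ((j : Int) + 3) = ((j + 3 : Nat) : Int) by push_cast; ring,
      PySem.List.pyGetD_natCast, PySem.List.pyGetD_natCast]
    have hp := pfx_getD nums (j + 3) (by omega)
    have hp2 := pfx_getD nums j (by omega)
    simp only [List.cons_append, List.nil_append] at *
    rw [hp, hp2]
  · rw [show PySem.List.pyRange 0 ((nums.length : Int) - 2) 1 = [] from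
      PySem.List.pyRange_one_eq_nil (by omega)]
    rw [tripleOdd_short nums (by omega)]
    rfl

-- ===== VERDICT (by name: the statement is the Claim_ definition above) =====
theorem three_odd_numbers_spec : Claim_equal_three_odd_numbers := by
  intro nums _
  unfold Spec_three_odd_numbers
  have hA : three_odd_numbers nums = tripleOdd nums := by
    have := aLoop_drop nums 0
    simpa [three_odd_numbers] using this
  rw [hA, alt_eq_tripleOdd]
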